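-- pv_equiv track=rewrite | github.com/RynuRen/BOJ_Answer | 프로그래머스/unrated/181851. 전국 대회 선발 고사/전국 대회 선발 고사.py | solution
-- ===== SOURCE A (Python) =====
-- def solution(rank, attendance):
--     answer = 0
--     lst = []
--     for i in range(len(rank)):
--         if attendance[i]:
--             lst.append((rank[i], i))
--     rerank = [i[1] for i in sorted(lst, key=lambda x:x[0], reverse=True)][-3:]
--     for i, r in enumerate(rerank):
--         answer += 100**i * r
--     return answer
-- ===== SOURCE B (Python) =====
-- def solution(rank, attendance):
--     # One pass: keep at most the three attending entries with the smallest
--     # ranks (ties prefer later indices), ordered by rank descending.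
--     best = []  # pairs (r, i) ordered by (-r, i) ascending, length <= 3
--     for i, (r, a) in enumerate(zip(rank, attendance)):
--         if a:
--             j = 0
--             while j < len(best) and (-best[j][0], best[j][1]) < (-r, i):
--                 j += 1
--             best.insert(j, (r, i))
--             if len(best) > 3:
--                 best.pop(0)
--     answer = 0
--     w = 1
--     for _, idx in best:
--         answer += w * idx
--         w *= 100
--     return answer
-- ===== Notes on version B (the rewrite author's own statement) =====
-- stated objective: alternative
-- what changed: B replaces A's full stable descending sort plus [-3:] slice by a single pass that maintains only the (at most) three attending entries with the smallest ranks (ties resolved like A's stable sort) in a bounded list, then forms the weighted sum directly.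
import Mathlib
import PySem

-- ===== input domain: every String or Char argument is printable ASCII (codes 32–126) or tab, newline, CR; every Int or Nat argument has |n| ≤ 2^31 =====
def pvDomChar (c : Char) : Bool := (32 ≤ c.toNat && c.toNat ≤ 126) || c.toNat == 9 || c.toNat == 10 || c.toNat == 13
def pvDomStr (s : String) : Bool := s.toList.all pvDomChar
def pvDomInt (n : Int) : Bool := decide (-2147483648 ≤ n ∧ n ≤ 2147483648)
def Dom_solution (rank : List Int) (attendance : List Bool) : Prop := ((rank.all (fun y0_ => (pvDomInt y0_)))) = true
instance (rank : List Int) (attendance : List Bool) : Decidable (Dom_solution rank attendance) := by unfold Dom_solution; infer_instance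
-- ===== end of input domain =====

-- B replaces A's full stable descending sort + [-3:] slice by one bounded-selection pass
-- keeping at most the three attending entries with the smallest ranks (objective: alternative).


-- ===== PORT A =====
def solution (rank : List Int) (attendance : List Bool) : Int :=
  let lst := (PySem.List.pyRange 0 rank.length 1).foldl
      (fun acc i => if PySem.List.pyGetD attendance i false
                    then acc ++ [(PySem.List.pyGetD rank i 0, i)] else acc) []
  let rerank := PySem.List.slice
      ((PySem.List.sorted lst (fun x => x.1) true).map (fun p => p.2)) (some (-3)) none
  (PySem.List.enumerate rerank 0).foldl (fun answer p => answer + 100 ^ p.1.toNat * p.2) 0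

-- ===== PORT B =====
-- the while-loop scan of Source B: index j advanced while (-best[j][0], best[j][1]) < (-r, i)
def solFindPos (r i : Int) : List (Int × Int) → Nat
  | [] => 0
  | p :: rest => if -p.1 < -r ∨ (-p.1 = -r ∧ p.2 < i) then solFindPos r i rest + 1 else 0

-- loop body of Source B: best.insert(j, (r, i)); if len(best) > 3: best.pop(0)
def solStep (best : List (Int × Int)) (r i : Int) : List (Int × Int) :=
  let best' := PySem.List.insert best ((solFindPos r i best : Nat) : Int) (r, i)
  if 3 < best'.length then best'.tail else best'  -- pop(0) drops the front; the popped value is unused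

def solution_alt (rank : List Int) (attendance : List Bool) : Int :=
  let best := (PySem.List.enumerate (rank.zip attendance) 0).foldl
      (fun best p => if p.2.2 then solStep best p.2.1 p.1 else best) []
  (best.foldl (fun s p => (s.1 + s.2 * p.2, s.2 * 100)) ((0 : Int), (1 : Int))).1

-- ===== PRECONDITION & SPEC =====
-- A indexes attendance[i] for every i < len(rank): it raises IndexError iff attendance is shorter than rank.
def Pre_solution (rank : List Int) (attendance : List Bool) : Prop :=
  rank.length ≤ attendance.length
instance (rank : List Int) (attendance : List Bool) : Decidable (Pre_solution rank attendance) := by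
  unfold Pre_solution; infer_instance

def pvWitness_solution : List Int × List Bool := ([3, 7, 2, 5], [true, true, false, true])

def Spec_solution (rank : List Int) (attendance : List Bool) (out : Int) : Prop :=
  out = solution_alt rank attendance
instance (rank : List Int) (attendance : List Bool) (out : Int) : Decidable (Spec_solution rank attendance out) := by
  unfold Spec_solution; infer_instance

-- ===== CLAIM (what is proved, stated in full; the proofs are below) =====
def Claim_equal_solution : Prop := ∀ (rank : List Int) (attendance : List Bool),
  Dom_solution rank attendance → Pre_solution rank attendance →
  Spec_solution rank attendance (solution rank attendance)

-- ===== LEMMAS AND PROOFS =====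

-- the comparison A's stable reverse sort inserts with
def befRev (x y : Int × Int) : Bool := decide (y.1 < x.1)

-- the last three elements of a list (what [-3:] takes)
def lastN3 {α : Type} (s : List α) : List α := s.drop (s.length - 3)

lemma enum_mem {α : Type} (xs : List α) (s : Int) {p : Int × α}
    (hp : p ∈ PySem.List.enumerate xs s) : ∃ k : Nat, p.1 = s + k ∧ xs[k]? = some p.2 := by
  induction xs generalizing s with
  | nil => simp [PySem.List.enumerate] at hp
  | cons x t ih =>
    rw [PySem.List.enumerate_cons] at hp
    rcases List.mem_cons.1 hp with h | h
    · exact ⟨0, by simp [h]⟩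
    · obtain ⟨k, hk1, hk2⟩ := ih (s + 1) h
      exact ⟨k + 1, by push_cast; omega, by simpa using hk2⟩

lemma enum_pairwise {α : Type} (xs : List α) (s : Int) :
    (PySem.List.enumerate xs s).Pairwise (fun a b => a.1 < b.1) := by
  induction xs generalizing s with
  | nil => simp [PySem.List.enumerate]
  | cons x t ih =>
    rw [PySem.List.enumerate_cons]
    refine List.pairwise_cons.2 ⟨?_, ih (s + 1)⟩
    intro b hb
    obtain ⟨k, hk1, _⟩ := enum_mem t (s + 1) hb
    simp only [hk1]; omega

-- A's list-building loop, as a filter/map over the enumerated zip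
lemma lstA_eq (rank : List Int) (attendance : List Bool) (h : rank.length ≤ attendance.length) :
    (PySem.List.pyRange 0 rank.length 1).foldl
      (fun acc i => if PySem.List.pyGetD attendance i false
                    then acc ++ [(PySem.List.pyGetD rank i 0, i)] else acc) [] =
    ((PySem.List.enumerate (rank.zip attendance) 0).filter (fun p => p.2.2)).map
      (fun p => (p.2.1, p.1)) := by
  have hz : (rank.zip attendance).length = rank.length := by simp [List.length_zip]; omega
  have hr : PySem.List.pyRange 0 (rank.length : Int) 1 =
      (PySem.List.enumerate (rank.zip attendance) 0).map (fun q => q.1) := by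
    rw [PySem.List.map_fst_enumerate, hz, zero_add]
  rw [hr, List.foldl_map]
  have hcongr := PySem.List.foldl_congr_mem (PySem.List.enumerate (rank.zip attendance) 0)
    (fun acc q => if PySem.List.pyGetD attendance q.1 false
                  then acc ++ [(PySem.List.pyGetD rank q.1 0, q.1)] else acc)
    (fun acc q => if q.2.2 then acc ++ [(q.2.1, q.1)] else acc) [] ?_
  · rw [hcongr]
    exact PySem.List.foldl_append_if (fun (p : Int × (Int × Bool)) => p.2.2)
      (fun (p : Int × (Int × Bool)) => (p.2.1, p.1)) _ []
  · intro acc p hp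
    obtain ⟨k, hk1, hk2⟩ := enum_mem _ 0 hp
    have hklt : k < (rank.zip attendance).length := by
      by_contra hge
      rw [List.getElem?_eq_none (by omega)] at hk2
      simp at hk2
    have hkr : k < rank.length := by omega
    have hka : k < attendance.length := by omega
    have hzk : p.2 = (rank[k], attendance[k]) := by
      have := List.getElem?_eq_getElem hklt
      rw [this] at hk2
      have := Option.some.inj hk2
      rw [← this, List.getElem_zip]
    have h1 : PySem.List.pyGetD attendance p.1 false = p.2.2 := by
      rw [hk1, zero_add, PySem.List.pyGetD_natCast, List.getD_eq_getElem _ _ hka, hzk]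
    have h2 : PySem.List.pyGetD rank p.1 0 = p.2.1 := by
      rw [hk1, zero_add, PySem.List.pyGetD_natCast, List.getD_eq_getElem _ _ hkr, hzk]
    simp only [h1, h2]

lemma insertBy_cons_true {x a : Int × Int} (l : List (Int × Int)) (h : befRev x a = true) :
    PySem.List.insertBy befRev x (a :: l) = x :: a :: l := by
  simp [PySem.List.insertBy, h]

lemma insertBy_cons_false {x a : Int × Int} (l : List (Int × Int)) (h : ¬ befRev x a = true) :
    PySem.List.insertBy befRev x (a :: l) = a :: PySem.List.insertBy befRev x l := by
  simp [PySem.List.insertBy, h]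

lemma insertBy_length {α : Type} (bef : α → α → Bool) (x : α) (s : List α) :
    (PySem.List.insertBy bef x s).length = s.length + 1 := by
  induction s with
  | nil => simp [PySem.List.insertBy]
  | cons y t ih => by_cases h : bef x y <;> simp [PySem.List.insertBy, h, ih]

lemma solFindPos_le (r i : Int) (s : List (Int × Int)) : solFindPos r i s ≤ s.length := by
  induction s with
  | nil => simp [solFindPos]
  | cons p t ih =>
    show (if -p.1 < -r ∨ (-p.1 = -r ∧ p.2 < i) then solFindPos r i t + 1 else 0) ≤ t.length + 1
    split <;> omega

-- Source B's scan-then-insert equals A's stable-sort insertion step, given a fresh (larger) index i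
lemma insert_scan (r i : Int) (s : List (Int × Int)) (hidx : ∀ p ∈ s, p.2 < i) :
    PySem.List.insert s ((solFindPos r i s : Nat) : Int) (r, i) =
    PySem.List.insertBy befRev (r, i) s := by
  induction s with
  | nil =>
    rw [show solFindPos r i [] = 0 from rfl, PySem.List.insert_natCast _ 0 _ (by simp)]
    simp [PySem.List.insertBy]
  | cons y t ih =>
    have hcond : solFindPos r i (y :: t)
        = if -y.1 < -r ∨ (-y.1 = -r ∧ y.2 < i) then solFindPos r i t + 1 else 0 := rfl
    by_cases h : -y.1 < -r ∨ (-y.1 = -r ∧ y.2 < i)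
    · have hy : ¬ (y.1 < r) := by rcases h with h | ⟨h, _⟩ <;> omega
      rw [hcond, if_pos h]
      rw [PySem.List.insert_natCast _ _ _
        (by simpa using Nat.succ_le_succ (solFindPos_le r i t))]
      rw [PySem.List.insert_natCast _ _ _ (solFindPos_le r i t)] at ih
      simp only [List.take_succ_cons, List.drop_succ_cons, List.cons_append]
      rw [ih (fun p hp => hidx p (List.mem_cons_of_mem _ hp))]
      simp [PySem.List.insertBy, befRev, hy]
    · have hy : y.1 < r := by
        have h2 := hidx y List.mem_cons_self
        rcases lt_trichotomy y.1 r with h' | h' | h'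
        · exact h'
        · exact absurd (Or.inr ⟨by omega, h2⟩) h
        · exact absurd (Or.inl (by omega)) h
      rw [hcond, if_neg h, PySem.List.insert_natCast _ 0 _ (by simp)]
      simp [PySem.List.insertBy, befRev, hy]

-- trimming after inserting into the last three = last three after inserting into the whole,
-- for a list sorted descending on the first component
lemma trim_insert (x : Int × Int) (s : List (Int × Int))
    (hs : s.Pairwise (fun a b => b.1 ≤ a.1)) :
    (if 3 < (PySem.List.insertBy befRev x (lastN3 s)).length
     then (PySem.List.insertBy befRev x (lastN3 s)).tail
     else PySem.List.insertBy befRev x (lastN3 s)) =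
    lastN3 (PySem.List.insertBy befRev x s) := by
  induction s with
  | nil =>
    simp [lastN3, PySem.List.insertBy]
  | cons a s' ih =>
    by_cases hlen : s'.length ≤ 2
    · -- whole list has length ≤ 3
      have h0 : lastN3 (a :: s') = a :: s' := by
        unfold lastN3
        rw [show (a :: s').length - 3 = 0 by simp; omega, List.drop_zero]
      rw [h0]
      have hL : (PySem.List.insertBy befRev x (a :: s')).length = s'.length + 2 := by
        rw [insertBy_length]; simp
      by_cases h2 : s'.length = 2
      · rw [if_pos (by omega)]
        unfold lastN3
        rw [hL, show s'.length + 2 - 3 = 1 by omega, List.drop_one]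
      · rw [if_neg (by omega)]
        unfold lastN3
        rw [hL, show s'.length + 2 - 3 = 0 by omega, List.drop_zero]
    · -- length ≥ 4
      have hs3 : 3 ≤ s'.length := by omega
      have h1 : lastN3 (a :: s') = lastN3 s' := by
        unfold lastN3
        rw [show (a :: s').length - 3 = (s'.length - 3) + 1 by simp; omega, List.drop_succ_cons]
      rw [h1]
      by_cases hb : befRev x a = true
      · rw [insertBy_cons_true s' hb]
        have ha : ∀ y ∈ s', y.1 ≤ a.1 := fun y hy => (List.pairwise_cons.1 hs).1 y hy
        have hax : a.1 < x.1 := by simpa [befRev] using hb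
        obtain ⟨b, rest, hbr⟩ : ∃ b rest, lastN3 s' = b :: rest := by
          have : (lastN3 s').length = 3 := by unfold lastN3; simp; omega
          cases h : lastN3 s' with
          | nil => rw [h] at this; simp at this
          | cons b rest => exact ⟨b, rest, rfl⟩
        have hbmem : b ∈ s' := by
          have : b ∈ lastN3 s' := by rw [hbr]; exact List.mem_cons_self
          exact List.mem_of_mem_drop this
        have hlen3 : (lastN3 s').length = 3 := by unfold lastN3; simp; omega
        have hrest : rest.length = 2 := by
          have h' := hlen3; rw [hbr] at h'; simpa using h'
        rw [hbr, insertBy_cons_true rest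
          (by simp only [befRev, decide_eq_true_eq]; exact lt_of_le_of_lt (ha b hbmem) hax)]
        rw [if_pos (by simp [hrest])]
        simp only [List.tail_cons]
        rw [← hbr]
        unfold lastN3
        rw [show (x :: a :: s').length - 3 = ((s'.length - 3) + 1) + 1 by simp; omega]
        rw [List.drop_succ_cons, List.drop_succ_cons]
      · rw [insertBy_cons_false s' hb]
        have hR : lastN3 (a :: PySem.List.insertBy befRev x s') =
            lastN3 (PySem.List.insertBy befRev x s') := by
          unfold lastN3
          rw [show (a :: PySem.List.insertBy befRev x s').length - 3 =
              ((PySem.List.insertBy befRev x s').length - 3) + 1 by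
            simp [insertBy_length]; omega, List.drop_succ_cons]
        rw [hR]
        exact ih (List.Pairwise.of_cons hs)

-- appending one element to the reverse-sorted list is one stable insertion
lemma sortedRev_append_singleton (L : List (Int × Int)) (x : Int × Int) :
    PySem.List.sorted (L ++ [x]) (fun p => p.1) true =
    PySem.List.insertBy befRev x (PySem.List.sorted L (fun p => p.1) true) := by
  rw [PySem.List.sorted_rev_eq_foldl_insertBy, PySem.List.sorted_rev_eq_foldl_insertBy,
    List.foldl_append]
  rfl

-- B's selection loop computes the last three of A's reverse-sorted list
lemma mainFold (E : List (Int × (Int × Bool))) (hE : E.Pairwise (fun a b => a.1 < b.1)) :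
    E.foldl (fun best p => if p.2.2 then solStep best p.2.1 p.1 else best) [] =
    lastN3 (PySem.List.sorted ((E.filter (fun p => p.2.2)).map (fun p => (p.2.1, p.1)))
      (fun x => x.1) true) := by
  induction E using List.reverseRecOn with
  | nil => simp [lastN3, PySem.List.sorted]
  | append_singleton E p ih =>
    rw [List.pairwise_append] at hE
    obtain ⟨hE1, _, hcross⟩ := hE
    rw [List.foldl_append, List.foldl_cons, List.foldl_nil, ih hE1]
    by_cases hp : p.2.2
    · rw [if_pos hp, List.filter_append, List.map_append]
      rw [show (List.filter (fun p => p.2.2) [p]) = [p] by simp [hp], List.map_cons, List.map_nil]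
      set S := PySem.List.sorted ((E.filter (fun p => p.2.2)).map (fun p => (p.2.1, p.1)))
        (fun x => x.1) true with hS
      rw [sortedRev_append_singleton]
      have hidx : ∀ q ∈ lastN3 S, q.2 < p.1 := by
        intro q hq
        have hqS : q ∈ S := List.mem_of_mem_drop hq
        rw [hS, PySem.List.mem_sorted] at hqS
        obtain ⟨a, ha, rfl⟩ := List.mem_map.1 hqS
        exact hcross a (List.mem_of_mem_filter ha) p List.mem_cons_self
      show solStep (lastN3 S) p.2.1 p.1 = _
      unfold solStep
      simp only [insert_scan p.2.1 p.1 (lastN3 S) hidx]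
      exact trim_insert (p.2.1, p.1) S (PySem.List.sorted_pairwise_rev _ _)
    · rw [if_neg hp]
      rw [show (List.filter (fun p => p.2.2) (E ++ [p])) = E.filter (fun p => p.2.2) by
        simp [List.filter_append, hp]]

-- A's enumerate-and-power sum equals B's running-weight fold, on the same pair list
lemma sum_eq (l : List (Int × Int)) (k : Nat) (a : Int) :
    (PySem.List.enumerate (l.map (fun p => p.2)) (k : Int)).foldl
      (fun answer p => answer + 100 ^ p.1.toNat * p.2) a =
    (l.foldl (fun s p => (s.1 + s.2 * p.2, s.2 * 100)) (a, (100 : Int) ^ k)).1 := by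
  induction l generalizing k a with
  | nil => simp
  | cons p t ih =>
    simp only [List.map_cons, PySem.List.enumerate_cons, List.foldl_cons]
    have : ((k : Int) + 1) = ((k + 1 : Nat) : Int) := by push_cast; ring
    rw [this, ih (k + 1)]
    norm_num [pow_succ]

-- ===== VERDICT (by name: the statement is the Claim_ definition above) =====
theorem solution_spec : Claim_equal_solution := by
  intro rank attendance _ hpre
  unfold Spec_solution solution solution_alt
  simp only []
  rw [lstA_eq rank attendance hpre]
  set S := PySem.List.sorted
      (((PySem.List.enumerate (rank.zip attendance) 0).filter (fun p => p.2.2)).map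
        (fun p => (p.2.1, p.1))) (fun x => x.1) true with hS
  have hslice : PySem.List.slice (S.map (fun p => p.2)) (some (-3)) none =
      (lastN3 S).map (fun p => p.2) := by
    rw [PySem.List.slice_from_neg_ofNat _ 3 (by omega), List.length_map, ← List.map_drop]
    rfl
  rw [hslice]
  rw [mainFold _ (enum_pairwise _ 0)]
  have := sum_eq (lastN3 S) 0 0
  simpa using this
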